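-- pv_equiv track=rewrite | github.com/KALkidan-Tadu/A2SV | Compare Strings by Frequency of the Smallest Character.py | count
-- ===== SOURCE A (Python) =====
-- def count(s):
--     s = sorted(s)
--     c = 0
--     for w in s:
--         if w != s[0]:
--             break
--         c += 1
--     return c
-- ===== SOURCE B (Python) =====
-- def count(s):
--     smallest = None
--     c = 0
--     for ch in s:
--         if smallest is None or ch < smallest:
--             smallest = ch
--             c = 1
--         elif ch == smallest:
--             c += 1
--     return c
-- ===== Notes on version B (the rewrite author's own statement) =====
-- stated objective: faster
-- what changed: Replaced sort-then-count-prefix with a single linear pass that tracks the smallest character seen so far and its running count.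
import Mathlib
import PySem

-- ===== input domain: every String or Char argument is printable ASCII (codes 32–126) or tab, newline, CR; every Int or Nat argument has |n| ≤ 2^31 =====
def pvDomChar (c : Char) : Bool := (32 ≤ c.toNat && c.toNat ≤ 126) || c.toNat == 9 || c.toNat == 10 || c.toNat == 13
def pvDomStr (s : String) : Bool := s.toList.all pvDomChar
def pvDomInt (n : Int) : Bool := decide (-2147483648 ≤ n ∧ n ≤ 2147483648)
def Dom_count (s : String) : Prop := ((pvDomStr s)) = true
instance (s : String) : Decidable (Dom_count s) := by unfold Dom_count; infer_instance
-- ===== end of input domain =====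

-- B replaces sort-then-count-prefix by one linear pass tracking the smallest char and its count.

-- ===== PORT A =====
-- A's for-loop with break: count leading elements of the sorted list equal to its head
def countLoopA (s0 : Char) : List Char → Int → Int
  | [], c => c
  | w :: rest, c => if w ≠ s0 then c else countLoopA s0 rest (c + 1)

def count (s : String) : Int :=
  match PySem.List.sorted s.toList (fun x => x) false with
  | [] => 0
  | h :: t => countLoopA h (h :: t) 0

-- ===== PORT B =====
-- B's single pass: state = (smallest char seen so far, its count)
def countLoopB : List Char → Option Char → Int → Int
  | [], _, c => c
  | ch :: rest, none, _ => countLoopB rest (some ch) 1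
  | ch :: rest, some m, c =>
    if ch < m then countLoopB rest (some ch) 1
    else if ch = m then countLoopB rest (some m) (c + 1)
    else countLoopB rest (some m) c

def count_alt (s : String) : Int := countLoopB s.toList none 0

-- ===== PRECONDITION & SPEC =====
def Spec_count (s : String) (out : Int) : Prop := out = count_alt s
instance (s : String) (out : Int) : Decidable (Spec_count s out) := by unfold Spec_count; infer_instance

-- ===== CLAIM (what is proved, stated in full; the proofs are below) =====
def Claim_equal_count : Prop := ∀ (s : String), Dom_count s → Spec_count s (count s)

-- ===== LEMMAS AND PROOFS =====

theorem foldl_min_le_init : ∀ (l : List Char) (a : Char), List.foldl min a l ≤ a := by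
  intro l
  induction l with
  | nil => intro a; simp
  | cons x t ih =>
    intro a
    calc List.foldl min (min a x) t ≤ min a x := ih (min a x)
      _ ≤ a := min_le_left _ _

theorem foldl_min_le_mem : ∀ (l : List Char) (a x : Char), x ∈ l → List.foldl min a l ≤ x := by
  intro l
  induction l with
  | nil => intro a x hx; simp at hx
  | cons y t ih =>
    intro a x hx
    rcases List.mem_cons.mp hx with h | h
    · subst h
      calc List.foldl min (min a x) t ≤ min a x := foldl_min_le_init _ _
        _ ≤ x := min_le_right _ _
    · exact ih _ _ h

theorem foldl_min_mem_or : ∀ (l : List Char) (a : Char),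
    List.foldl min a l = a ∨ List.foldl min a l ∈ l := by
  intro l
  induction l with
  | nil => intro a; simp
  | cons y t ih =>
    intro a
    rcases ih (min a y) with h | h
    · simp only [List.foldl, h]
      rcases le_total a y with hle | hle
      · left; exact min_eq_left hle
      · right; simp [min_eq_right hle]
    · right; exact List.mem_cons_of_mem _ h

-- B's loop computes the count of the running minimum
theorem countLoopB_some : ∀ (l : List Char) (m : Char) (c : Int),
    countLoopB l (some m) c =
      (l.count (List.foldl min m l) : Int) +
        (if List.foldl min m l = m then c else 0) := by
  intro l
  induction l with
  | nil => intro m c; simp [countLoopB]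
  | cons ch rest ih =>
    intro m c
    by_cases hlt : ch < m
    · have hmin : min m ch = ch := min_eq_right (le_of_lt hlt)
      have hM : List.foldl min m (ch :: rest) = List.foldl min ch rest := by
        simp [List.foldl, hmin]
      have hMle : List.foldl min ch rest ≤ ch := foldl_min_le_init rest ch
      have hMne : List.foldl min ch rest ≠ m := fun h => absurd (h ▸ hMle) (not_le.mpr hlt)
      simp only [countLoopB, if_pos hlt, hM, if_neg hMne, add_zero]
      rw [ih ch 1]
      by_cases hch : List.foldl min ch rest = ch
      · simp [hch]
      · have hch' : ch ≠ List.foldl min ch rest := fun h => hch h.symm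
        simp [hch, hch']
    · by_cases heq : ch = m
      · subst heq
        have hM : List.foldl min ch (ch :: rest) = List.foldl min ch rest := by
          simp [List.foldl]
        simp only [countLoopB, if_neg hlt, hM]
        rw [ih ch (c + 1)]
        by_cases hm : List.foldl min ch rest = ch
        · simp [hm]; ring
        · have hm' : ch ≠ List.foldl min ch rest := fun h => hm h.symm
          simp [hm, hm']
      · have hgt : m < ch := lt_of_le_of_ne (not_lt.mp hlt) (fun h => heq h.symm)
        have hmin : min m ch = m := min_eq_left (le_of_lt hgt)
        have hM : List.foldl min m (ch :: rest) = List.foldl min m rest := by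
          simp [List.foldl, hmin]
        have hMle : List.foldl min m rest ≤ m := foldl_min_le_init rest m
        have hMne : ch ≠ List.foldl min m rest := fun h =>
          absurd (h ▸ hMle) (not_le.mpr hgt)
        simp only [countLoopB, if_neg hlt, if_neg heq, hM]
        rw [ih m c]
        simp [List.count_cons, hMne]

-- A's loop on a sorted list bounded below by s0 counts the occurrences of s0
theorem countLoopA_sorted : ∀ (l : List Char) (s0 : Char) (c : Int),
    l.Pairwise (· ≤ ·) → (∀ x ∈ l, s0 ≤ x) →
    countLoopA s0 l c = c + (l.count s0 : Int) := by
  intro l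
  induction l with
  | nil => intro s0 c _ _; simp [countLoopA]
  | cons w rest ih =>
    intro s0 c hpw hlb
    rcases List.pairwise_cons.mp hpw with ⟨hw, hrest⟩
    by_cases hne : w = s0
    · subst hne
      rw [show countLoopA w (w :: rest) c = countLoopA w rest (c + 1) from by
        simp [countLoopA]]
      rw [ih w (c + 1) hrest hw]
      simp [List.count_cons]; ring
    · have hlt : s0 < w := lt_of_le_of_ne (hlb w List.mem_cons_self) (fun h => hne h.symm)
      have hz : (w :: rest).count s0 = 0 := by
        rw [List.count_eq_zero]
        intro hmem
        rcases List.mem_cons.mp hmem with h | h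
        · exact hne h.symm
        · exact absurd (hw _ h) (not_le.mpr hlt)
      simp [countLoopA, hne, hz]

-- ===== VERDICT (by name: the statement is the Claim_ definition above) =====
theorem count_spec : Claim_equal_count := by
  intro s _
  unfold Spec_count count count_alt
  cases hl : s.toList with
  | nil =>
    have hs : PySem.List.sorted ([] : List Char) (fun x => x) false = [] := by decide
    simp [hs, countLoopB]
  | cons ch rest =>
    cases hsrt : PySem.List.sorted (ch :: rest) (fun x => x) false with
    | nil =>
      have := PySem.List.sorted_perm (ch :: rest) (fun x : Char => x) false
      rw [hsrt] at this
      exact absurd this.symm (by simp)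
    | cons h t =>
      -- A's side: count of h in the sorted list
      have hpw : (h :: t).Pairwise (fun a b : Char => a ≤ b) := by
        have := PySem.List.sorted_pairwise (ch :: rest) (fun x : Char => x)
        rwa [hsrt] at this
      have hlb0 : ∀ y ∈ ch :: rest, h ≤ y :=
        PySem.List.key_head_sorted_le (ch :: rest) (fun x : Char => x) hsrt
      have hlb : ∀ x ∈ h :: t, h ≤ x := by
        intro x hx
        have hperm : (h :: t).Perm (ch :: rest) := by
          have := PySem.List.sorted_perm (ch :: rest) (fun x : Char => x) false
          rwa [hsrt] at this
        exact hlb0 x (hperm.mem_iff.mp hx)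
      have hA : countLoopA h (h :: t) 0 = ((h :: t).count h : Int) := by
        rw [countLoopA_sorted _ _ _ hpw hlb]; ring
      -- B's side: count of the running minimum M
      set M := List.foldl min ch rest with hMdef
      have hB : countLoopB rest (some ch) 1 =
          (((ch :: rest).count M : Nat) : Int) := by
        rw [countLoopB_some rest ch 1, ← hMdef]
        by_cases hm : M = ch
        · simp [hm]
        · have hm' : ch ≠ M := fun h => hm h.symm
          simp [hm, hm']
      -- h = M
      have hperm : (h :: t).Perm (ch :: rest) := by
        have := PySem.List.sorted_perm (ch :: rest) (fun x : Char => x) false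
        rwa [hsrt] at this
      have hMmem : M ∈ ch :: rest := by
        rcases foldl_min_mem_or rest ch with h' | h'
        · rw [hMdef, h']; exact List.mem_cons_self
        · exact List.mem_cons_of_mem _ h'
      have hhM : h = M := by
        apply le_antisymm
        · exact hlb0 M hMmem
        · have hhmem : h ∈ ch :: rest := hperm.mem_iff.mp List.mem_cons_self
          rcases List.mem_cons.mp hhmem with h' | h'
          · rw [h', hMdef]; exact foldl_min_le_init rest ch
          · exact foldl_min_le_mem rest ch h h'
      show countLoopA h (h :: t) 0 = countLoopB rest (some ch) 1
      rw [hA, hB, hhM]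
      exact_mod_cast (hhM ▸ hperm : (M :: t).Perm (ch :: rest)).count_eq M
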